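-- pv_equiv track=rewrite | github.com/delkreiser/boulderevents | clean_events.py | deduplicate_recurring_events
-- ===== SOURCE A (Python) =====
-- def deduplicate_recurring_events(events):
--     """Remove duplicate recurring events - keep only one instance"""
--
--     seen_events = {}
--     cleaned_events = []
--
--     for event in events:
--         # Create a unique key from venue + title
--         # This will catch duplicates even if they don't have a "recurring" field
--         key = f"{event.get('venue')}|{event.get('title')}"
--
--         if key in seen_events:
--             # This is a duplicate
--             # Keep the one with more information (has description, date, etc.)
--             existing = seen_events[key]
--
--             # Prefer the event with a description
--             if event.get('description') and not existing.get('description'):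
--                 seen_events[key] = event
--                 continue
--
--             # Otherwise skip this duplicate
--             continue
--
--         seen_events[key] = event
--
--     # Convert back to list
--     cleaned_events = list(seen_events.values())
--
--     return cleaned_events
-- ===== SOURCE B (Python) =====
-- def deduplicate_recurring_events(events):
--     """Remove duplicate recurring events - keep only one instance"""
--     groups = {}
--     for event in events:
--         groups.setdefault(f"{event.get('venue')}|{event.get('title')}", []).append(event)
--     return [next((e for e in g if e.get('description')), g[0]) for g in groups.values()]
-- ===== Notes on version B (the rewrite author's own statement) =====
-- stated objective: alternative
-- what changed: Replaces A's on-the-fly conditional-replacement dict of single events with a two-pass group-then-reduce: first group all events by venue|title key into lists, then pick per group the first event with a truthy description (else the group's first event).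
import Mathlib
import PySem

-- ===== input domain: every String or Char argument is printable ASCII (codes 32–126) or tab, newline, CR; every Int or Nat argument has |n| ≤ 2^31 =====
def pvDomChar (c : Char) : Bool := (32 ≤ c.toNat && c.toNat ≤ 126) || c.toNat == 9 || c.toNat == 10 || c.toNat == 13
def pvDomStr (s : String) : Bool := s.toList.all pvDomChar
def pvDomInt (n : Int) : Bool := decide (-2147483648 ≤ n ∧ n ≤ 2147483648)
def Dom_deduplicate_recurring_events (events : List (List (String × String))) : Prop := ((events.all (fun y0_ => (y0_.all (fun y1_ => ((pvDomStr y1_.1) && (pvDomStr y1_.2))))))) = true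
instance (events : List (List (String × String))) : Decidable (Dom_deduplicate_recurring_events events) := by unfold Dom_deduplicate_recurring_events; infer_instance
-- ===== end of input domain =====

-- B changes the decomposition: an explicit group-by-key pass followed by a per-group pick of the
-- first described event, instead of A's single pass with conditional in-place replacement.
-- Same O(n) cost; objective: alternative decomposition.

-- ===== PORT A =====

-- event.get(k) on the event dict
def evGet (e : List (String × String)) (k : String) : Option String :=
  (PySem.Dict.mk e).get? k

-- f"{event.get('venue')}|{event.get('title')}"  (None renders as "None")
def pyKey (e : List (String × String)) : String :=
  ((evGet e "venue").getD "None") ++ "|" ++ ((evGet e "title").getD "None")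

-- truthiness of event.get('description'): non-None and non-empty
def described (e : List (String × String)) : Bool :=
  ((evGet e "description").getD "") != ""

-- one iteration of A's for-loop over `seen_events`
def aStep (seen : PySem.Dict String (List (String × String))) (event : List (String × String)) :
    PySem.Dict String (List (String × String)) :=
  let key := pyKey event
  match seen.get? key with
  | some existing =>
      if described event && !described existing then seen.insert key event else seen
  | none => seen.insert key event

def deduplicate_recurring_events (events : List (List (String × String))) : List (List (String × String)) :=
  let seen_events := events.foldl aStep PySem.Dict.empty
  let cleaned_events := seen_events.values
  cleaned_events

-- ===== PORT B =====

-- groups.setdefault(key, []).append(event)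
def bStep (groups : PySem.Dict String (List (List (String × String)))) (event : List (String × String)) :
    PySem.Dict String (List (List (String × String))) :=
  groups.modify (pyKey event) [] (fun g => g ++ [event])

-- next((e for e in g if e.get('description')), g[0])
def pickRep (g : List (List (String × String))) : List (String × String) :=
  match g.find? described with
  | some e => e
  | none => g.headD []

def deduplicate_recurring_events_alt (events : List (List (String × String))) : List (List (String × String)) :=
  let groups := events.foldl bStep PySem.Dict.empty
  (groups.values).map pickRep

-- ===== PRECONDITION & SPEC =====
def Spec_deduplicate_recurring_events (events : List (List (String × String))) (out : List (List (String × String))) : Prop := out = deduplicate_recurring_events_alt events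
instance (events : List (List (String × String))) (out : List (List (String × String))) : Decidable (Spec_deduplicate_recurring_events events out) := by unfold Spec_deduplicate_recurring_events; infer_instance

-- ===== CLAIM (what is proved, stated in full; the proofs are below) =====
def Claim_equal_deduplicate_recurring_events : Prop := ∀ (events : List (List (String × String))), Dom_deduplicate_recurring_events events → Spec_deduplicate_recurring_events events (deduplicate_recurring_events events)

-- ===== LEMMAS AND PROOFS =====

-- A's seen-dict is B's groups-dict with every group replaced by its representative
def mapVal (d : PySem.Dict String (List (List (String × String)))) :
    PySem.Dict String (List (String × String)) :=
  PySem.Dict.mk (d.items.map (fun p => (p.1, pickRep p.2)))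

theorem contains_mapVal (d : PySem.Dict String (List (List (String × String)))) (k : String) :
    (mapVal d).contains k = d.contains k := by
  simp [mapVal, PySem.Dict.contains, List.any_map, Function.comp_def]

theorem get?_mapVal (d : PySem.Dict String (List (List (String × String)))) (k : String) :
    (mapVal d).get? k = (d.get? k).map pickRep := by
  simp [mapVal, PySem.Dict.get?, List.find?_map, Function.comp_def, Option.map_map]

theorem insert_mapVal (d : PySem.Dict String (List (List (String × String)))) (k : String)
    (g : List (List (String × String))) :
    mapVal (d.insert k g) = (mapVal d).insert k (pickRep g) := by
  simp only [PySem.Dict.insert, contains_mapVal]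
  split_ifs with h
  · simp only [mapVal, List.map_map]
    congr 1
    apply List.map_congr_left
    intro p _
    by_cases hp : p.1 = k <;> simp [hp]
  · simp [mapVal]

theorem keys_mapVal (d : PySem.Dict String (List (List (String × String)))) :
    (mapVal d).keys = d.keys := by
  simp [mapVal, PySem.Dict.keys, List.map_map, Function.comp]

-- inserting the value a nodup-keyed dict already holds at k changes nothing
theorem insert_get?_self {ν : Type} (d : PySem.Dict String ν) (k : String) (v : ν)
    (hnd : d.keys.Nodup) (hget : d.get? k = some v) : d.insert k v = d := by
  have hc : d.contains k = true := by
    rw [PySem.Dict.contains_eq_isSome_get?, hget]; rfl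
  obtain ⟨q, hq, hqk, hqv⟩ : ∃ q, List.find? (fun p => p.1 == k) d.items = some q ∧ q.1 = k ∧ q.2 = v := by
    simp only [PySem.Dict.get?] at hget
    rcases Option.map_eq_some_iff.mp hget with ⟨q, hq, hv⟩
    exact ⟨q, hq, by simpa using List.find?_some hq, hv⟩
  have hqmem : q ∈ d.items := List.mem_of_find?_eq_some hq
  have hinj := List.inj_on_of_nodup_map (f := fun p : String × ν => p.1)
    (by simpa [PySem.Dict.keys] using hnd)
  simp only [PySem.Dict.insert, hc, if_pos]
  apply PySem.Dict.ext
  rw [List.map_congr_left (g := id) ?_, List.map_id]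
  intro p hp
  by_cases hpk : (p.1 == k) = true
  · have hpq : p = q := hinj hp hqmem (by rw [hqk]; exact eq_of_beq hpk)
    simp [hpq, ← hqk, ← hqv]
  · simp [hpk]

-- the representative of an extended group, in terms of the old representative
theorem pickRep_append (g : List (List (String × String))) (e : List (String × String))
    (hg : g ≠ []) :
    pickRep (g ++ [e]) =
      if described e && !described (pickRep g) then e else pickRep g := by
  simp only [pickRep, List.find?_append]
  cases hfind : g.find? described with
  | some x =>
      have hx : described x = true := List.find?_some hfind
      simp [hx]
  | none =>
      have hhead : described (g.headD []) = false := by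
        have := List.find?_eq_none.mp hfind (g.headD []) (by
          cases g with
          | nil => exact absurd rfl hg
          | cons a t => simp)
        simpa using this
      cases hde : described e with
      | true =>
          simp [List.find?, hde, -List.headD_eq_head?_getD, hhead]
      | false =>
          cases g with
          | nil => exact absurd rfl hg
          | cons a t => simp [List.find?, hde]

-- values of groups dicts stay nonempty through bStep
theorem bStep_nonempty (d : PySem.Dict String (List (List (String × String))))
    (e : List (String × String)) (h : ∀ p ∈ d.items, p.2 ≠ []) :
    ∀ p ∈ (bStep d e).items, p.2 ≠ [] := by
  intro p hp
  simp only [bStep, PySem.Dict.modify] at hp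
  rcases (PySem.Dict.mem_items_insert _ _ _ _).mp hp with hpe | ⟨hpd, _⟩
  · subst hpe; simp
  · exact h p hpd

-- the single-step commutation: A's step on the mapped dict is B's step, mapped
theorem step_comm (d : PySem.Dict String (List (List (String × String))))
    (e : List (String × String)) (hnd : d.keys.Nodup) (h : ∀ p ∈ d.items, p.2 ≠ []) :
    aStep (mapVal d) e = mapVal (bStep d e) := by
  simp only [aStep, bStep, PySem.Dict.modify, get?_mapVal]
  cases hget : d.get? (pyKey e) with
  | none =>
      have hc : d.contains (pyKey e) = false := by
        rw [PySem.Dict.contains_eq_isSome_get?, hget]; rfl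
      have : d.getD (pyKey e) [] = [] := PySem.Dict.getD_of_not_contains d [] hc
      rw [insert_mapVal, this]
      simp only [Option.map_none, List.nil_append]
      congr 1
      cases hde : described e <;> simp [pickRep, List.find?, hde]
  | some g =>
      have hgne : g ≠ [] := by
        simp only [PySem.Dict.get?] at hget
        rcases Option.map_eq_some_iff.mp hget with ⟨q, hq, hv⟩
        exact hv ▸ h q (List.mem_of_find?_eq_some hq)
      have hgetD : d.getD (pyKey e) [] = g := PySem.Dict.getD_of_get?_eq_some d [] hget
      rw [insert_mapVal, hgetD, pickRep_append g e hgne]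
      simp only [Option.map_some]
      by_cases hcond : described e && !described (pickRep g)
      · simp [hcond]
      · rw [if_neg hcond]
        simp only [Bool.not_eq_true] at hcond
        rw [if_neg (by simp [hcond])]
        exact (insert_get?_self (mapVal d) (pyKey e) (pickRep g)
          (by rw [keys_mapVal]; exact hnd)
          (by rw [get?_mapVal, hget]; rfl)).symm

-- nodup keys are preserved by bStep
theorem bStep_nodup (d : PySem.Dict String (List (List (String × String))))
    (e : List (String × String)) (hnd : d.keys.Nodup) : (bStep d e).keys.Nodup := by
  simpa [bStep, PySem.Dict.modify] using PySem.Dict.nodup_keys_insert d (pyKey e) _ hnd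

-- the loop invariant
theorem loop_comm (l : List (List (String × String)))
    (d : PySem.Dict String (List (List (String × String))))
    (hnd : d.keys.Nodup) (h : ∀ p ∈ d.items, p.2 ≠ []) :
    l.foldl aStep (mapVal d) = mapVal (l.foldl bStep d) := by
  induction l generalizing d with
  | nil => rfl
  | cons e l ih =>
      simp only [List.foldl_cons]
      rw [step_comm d e hnd h]
      exact ih (bStep d e) (bStep_nodup d e hnd) (bStep_nonempty d e h)

theorem values_mapVal (d : PySem.Dict String (List (List (String × String)))) :
    (mapVal d).values = d.values.map pickRep := by
  simp [mapVal, PySem.Dict.values, List.map_map, Function.comp]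

-- ===== VERDICT (by name: the statement is the Claim_ definition above) =====
theorem deduplicate_recurring_events_spec : Claim_equal_deduplicate_recurring_events := by
  intro events _
  show deduplicate_recurring_events events = deduplicate_recurring_events_alt events
  simp only [deduplicate_recurring_events, deduplicate_recurring_events_alt]
  have hempty : (PySem.Dict.empty : PySem.Dict String (List (String × String))) = mapVal PySem.Dict.empty := rfl
  rw [hempty, loop_comm events PySem.Dict.empty PySem.Dict.nodup_keys_empty (by simp [PySem.Dict.empty]),
      values_mapVal]
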